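-- pv_equiv track=rewrite | github.com/fineday37/selenium | tests/identify.py | ez_map
-- ===== SOURCE A (Python) =====
-- def ez_map(thresold):
--     res = []
--     for i in range(256):
--         if i < thresold:
--             res.append(0)
--         else:
--             res.append(1)
--     return res
-- ===== SOURCE B (Python) =====
-- def ez_map(thresold):
--     k = 0 if thresold < 0 else 256 if thresold > 256 else thresold
--     return [0] * k + [1] * (256 - k)
-- ===== Notes on version B (the rewrite author's own statement) =====
-- stated objective: simpler
-- what changed: Replaces the 256-iteration per-element compare/append loop with a closed-form clamp of the threshold to [0,256] and two constant list fills [0]*k + [1]*(256-k).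
import Mathlib
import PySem

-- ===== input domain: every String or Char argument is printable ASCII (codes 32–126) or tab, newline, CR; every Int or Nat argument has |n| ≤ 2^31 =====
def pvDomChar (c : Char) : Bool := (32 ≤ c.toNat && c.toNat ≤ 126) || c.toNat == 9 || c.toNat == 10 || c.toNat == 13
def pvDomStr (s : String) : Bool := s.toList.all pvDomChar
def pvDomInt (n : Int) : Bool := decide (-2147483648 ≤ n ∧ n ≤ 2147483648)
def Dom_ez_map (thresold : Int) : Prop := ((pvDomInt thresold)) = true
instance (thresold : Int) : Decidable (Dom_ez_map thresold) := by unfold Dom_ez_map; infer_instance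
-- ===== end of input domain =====

-- B replaces A's 256-iteration compare/append loop with a clamp of the threshold to [0,256]
-- and two constant fills [0]*k ++ [1]*(256-k); objective: simpler.

-- ===== PORT A =====
def ez_map (thresold : Int) : List Int :=
  (PySem.List.pyRange 0 256 1).foldl
    (fun res i => res ++ [if i < thresold then (0 : Int) else 1]) []

-- ===== PORT B =====
def ez_map_alt (thresold : Int) : List Int :=
  let k : Int := if thresold < 0 then 0 else if thresold > 256 then 256 else thresold
  List.replicate k.toNat 0 ++ List.replicate (256 - k).toNat 1

-- ===== PRECONDITION & SPEC =====
def Spec_ez_map (thresold : Int) (out : List Int) : Prop := out = ez_map_alt thresold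
instance (thresold : Int) (out : List Int) : Decidable (Spec_ez_map thresold out) := by unfold Spec_ez_map; infer_instance

-- ===== CLAIM (what is proved, stated in full; the proofs are below) =====
def Claim_equal_ez_map : Prop := ∀ (thresold : Int), Dom_ez_map thresold → Spec_ez_map thresold (ez_map thresold)

-- ===== LEMMAS AND PROOFS =====

-- A's loop output on range n, in closed form: a run of 0s of length min n ⌈t⌉₊ then 1s.
theorem ez_map_loop_closed (t : Int) (n : ℕ) :
    (List.range n).map (fun (j : ℕ) => if ((j : ℕ) : Int) < t then (0 : Int) else 1)
      = List.replicate (min n (Int.toNat t)) 0 ++ List.replicate (n - min n (Int.toNat t)) 1 := by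
  induction n with
  | zero => simp
  | succ n ih =>
    rw [List.range_succ, List.map_append, ih, List.map_singleton]
    by_cases h : (n : Int) < t
    · have hk : n < Int.toNat t := by omega
      have h1 : min (n + 1) (Int.toNat t) = n + 1 := by omega
      have h2 : min n (Int.toNat t) = n := by omega
      simp [h, h2, List.replicate_succ' (n := n)]
    · have hk : Int.toNat t ≤ n := by omega
      have h1 : min (n + 1) (Int.toNat t) = Int.toNat t := by omega
      have h2 : min n (Int.toNat t) = Int.toNat t := by omega
      have h3 : n + 1 - Int.toNat t = (n - Int.toNat t) + 1 := by omega
      simp [h, h1, h2, h3, List.replicate_succ' (n := n - Int.toNat t), List.append_assoc]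

-- ===== VERDICT (by name: the statement is the Claim_ definition above) =====
theorem ez_map_spec : Claim_equal_ez_map := by
  intro t _
  show ez_map t = ez_map_alt t
  unfold ez_map ez_map_alt
  rw [PySem.List.foldl_append_singleton_eq_map, List.nil_append,
      PySem.List.pyRange_one]
  have h256 : ((256 : Int) - 0).toNat = 256 := by decide
  rw [h256, List.map_map]
  simp only [Function.comp_def, zero_add]
  rw [ez_map_loop_closed t 256]
  show _ = List.replicate (if t < 0 then (0:Int) else if t > 256 then 256 else t).toNat 0
        ++ List.replicate ((256 : Int) - (if t < 0 then (0:Int) else if t > 256 then 256 else t)).toNat 1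
  by_cases h0 : t < 0
  · rw [if_pos h0]
    have ha : min 256 (Int.toNat t) = (0 : Int).toNat := by omega
    have hb : 256 - Int.toNat (0 : Int) = ((256 : Int) - 0).toNat := by omega
    rw [ha, hb]
  · rw [if_neg h0]
    by_cases h1 : t > 256
    · rw [if_pos h1]
      have ha : min 256 (Int.toNat t) = (256 : Int).toNat := by omega
      have hb : 256 - Int.toNat (256 : Int) = ((256 : Int) - 256).toNat := by omega
      rw [ha, hb]
    · rw [if_neg h1]
      have ha : min 256 (Int.toNat t) = Int.toNat t := by omega
      have hb : 256 - Int.toNat t = ((256 : Int) - t).toNat := by omega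
      rw [ha, hb]
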